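-- pv_equiv track=rewrite | github.com/juhyunn1/CT | ch12/10_1.py | solution
-- ===== SOURCE A (Python) =====
-- def rotate(before):
--   n = len(before)
--   m = len(before[0])
--   after = [[0] * n for _ in range(m)]
--
--   for i in range(n):
--     for j in range(m):
--       after[j][n - i - 1] = before[i][j]
--
--   return after
--
-- def check(extended, n, m):
--   for i in range(n, 2 * n):
--     for j in range(m, 2 * m):
--       if extended[i][j] != 1:
--         return False
--   else:
--     return True
--
-- def solution(key, lock):
--   n = len(lock)
--   m = len(lock[0])
--
--   extended = [[1] * (3 * m) for _ in range(3 * n)]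
--   for i in range(n):
--     for j in range(m):
--       extended[n + i][m + j] = lock[i][j]  # 가운데 lock 대입
--
--   for i in range(1, 2 * n):
--     for j in range(1, 2 * m):
--       for k in range(4):
--         key = rotate(key)
--         for r in range(len(key)):
--           for c in range(len(key[0])):
--             extended[i + r][j + c] += key[r][c]
--
--         if check(extended, n, m):  # 열쇠가 맞으면
--           return True
--
--         for r in range(len(key)):
--           for c in range(len(key[0])):
--             extended[i + r][j + c] -= key[r][c]  # 원상복구
--
--   return False
-- ===== SOURCE B (Python) =====
-- def solution(key, lock):
--     n, m = len(lock), len(lock[0])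
--     rots = []
--     g = key
--     for _ in range(4):
--         g = [[g[i][j] for i in reversed(range(len(g)))] for j in range(len(g[0]))]
--         rots.append(g)
--     for di in range(1 - n, n):
--         for dj in range(1 - m, m):
--             for g in rots:
--                 kn, km = len(g), len(g[0])
--                 if all(lock[r][c] + (g[r - di][c - dj]
--                                      if 0 <= r - di < kn and 0 <= c - dj < km else 0) == 1
--                        for r in range(n) for c in range(m)):
--                     return True
--     return False
-- ===== Notes on version B (the rewrite author's own statement) =====
-- stated objective: faster
-- what changed: B precomputes the 4 key rotations once and, for each placement offset, directly tests the predicate lock[r][c]+overlapping-key-cell == 1 with bounds-checked indexing and early exit, instead of A's building a 3n x 3m grid and, for every candidate, re-rotating the key and stamping/checking/unstamping it in place.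
-- outside the precondition, e.g. on solution([[]], [[1]]): A returns True, B raises IndexError
import Mathlib
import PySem

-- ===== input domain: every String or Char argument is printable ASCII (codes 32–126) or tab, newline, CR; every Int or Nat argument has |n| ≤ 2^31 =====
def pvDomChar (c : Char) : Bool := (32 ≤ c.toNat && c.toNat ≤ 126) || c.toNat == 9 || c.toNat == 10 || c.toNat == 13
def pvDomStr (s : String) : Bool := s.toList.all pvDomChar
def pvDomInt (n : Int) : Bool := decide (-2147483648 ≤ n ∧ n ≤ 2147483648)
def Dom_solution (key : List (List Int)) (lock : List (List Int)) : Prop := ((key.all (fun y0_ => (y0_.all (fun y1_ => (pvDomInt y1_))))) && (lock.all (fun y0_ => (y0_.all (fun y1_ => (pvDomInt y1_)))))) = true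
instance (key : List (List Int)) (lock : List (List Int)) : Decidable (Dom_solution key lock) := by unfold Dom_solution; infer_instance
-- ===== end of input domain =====

-- B precomputes the 4 key rotations once and tests each placement by a direct bounds-checked
-- predicate with early exit, instead of A's per-candidate rotate/stamp/check/unstamp on a 3n×3m grid.

-- ===== PORT A =====

-- grid cell read `g[i][j]` (always in range where A reads; getD defaults are guards only)
def gget (g : List (List Int)) (i j : Nat) : Int := (g.getD i []).getD j 0

-- A's rotate: after[j][n-i-1] = before[i][j]
def rotateA (before : List (List Int)) : List (List Int) :=
  let n := before.length
  let m := before.headI.length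
  (List.range n).foldl (fun after i =>
    (List.range m).foldl (fun after j =>
      after.modify j (fun row => row.set (n - i - 1) (gget before i j))) after)
    (List.replicate m (List.replicate n (0 : Int)))

-- A's check: extended[i][j] == 1 for i in [n,2n), j in [m,2m)  (for-else with early return = all)
def checkA (ext : List (List Int)) (n m : Nat) : Bool :=
  (List.range n).all (fun i => (List.range m).all (fun j => gget ext (n + i) (m + j) == 1))

-- A's stamping loop: extended[i+r][j+c] += key[r][c]
def addA (ext : List (List Int)) (i j : Nat) (g : List (List Int)) : List (List Int) :=
  (List.range g.length).foldl (fun ext r =>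
    (List.range g.headI.length).foldl (fun ext c =>
      ext.modify (i + r) (fun row => row.modify (j + c) (· + gget g r c))) ext) ext

-- A's restoring loop: extended[i+r][j+c] -= key[r][c]
def subA (ext : List (List Int)) (i j : Nat) (g : List (List Int)) : List (List Int) :=
  (List.range g.length).foldl (fun ext r =>
    (List.range g.headI.length).foldl (fun ext c =>
      ext.modify (i + r) (fun row => row.modify (j + c) (· - gget g r c))) ext) ext

-- extended = 3n×3m of 1s with lock copied into the centre
def extBase (lock : List (List Int)) (n m : Nat) : List (List Int) :=
  (List.range n).foldl (fun ext i =>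
    (List.range m).foldl (fun ext j =>
      ext.modify (n + i) (fun row => row.set (m + j) (gget lock i j))) ext)
    (List.replicate (3 * n) (List.replicate (3 * m) (1 : Int)))

-- the `for k in range(4)` loop: rotate, stamp, check (early return), unstamp
def loopKA (n m i j : Nat) : Nat → List (List Int) → List (List Int) → Bool × List (List Int) × List (List Int)
  | 0, ext, key => (false, ext, key)
  | k + 1, ext, key =>
    let key' := rotateA key
    let ext' := addA ext i j key'
    if checkA ext' n m then (true, ext', key')
    else loopKA n m i j k (subA ext' i j key') key'

-- the `for j in range(1, 2*m)` loop
def loopJA (n m i : Nat) : List Nat → List (List Int) → List (List Int) → Bool × List (List Int) × List (List Int)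
  | [], ext, key => (false, ext, key)
  | j :: js, ext, key =>
    let r := loopKA n m i j 4 ext key
    if r.1 then r else loopJA n m i js r.2.1 r.2.2

-- the `for i in range(1, 2*n)` loop
def loopIA (n m : Nat) (js : List Nat) : List Nat → List (List Int) → List (List Int) → Bool × List (List Int) × List (List Int)
  | [], ext, key => (false, ext, key)
  | i :: is, ext, key =>
    let r := loopJA n m i js ext key
    if r.1 then r else loopIA n m js is r.2.1 r.2.2

def solution (key : List (List Int)) (lock : List (List Int)) : Bool :=
  let n := lock.length
  let m := lock.headI.length
  let ext := extBase lock n m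
  (loopIA n m ((List.range (2 * m - 1)).map (· + 1)) ((List.range (2 * n - 1)).map (· + 1)) ext key).1

-- ===== PORT B =====

-- B's rotation: [[g[i][j] for i in reversed(range(len(g)))] for j in range(len(g[0]))]
def rotB (g : List (List Int)) : List (List Int) :=
  (List.range g.headI.length).map (fun j => ((List.range g.length).reverse).map (fun i => gget g i j))

-- B's placement test: all(lock[r][c] + (g[r-di][c-dj] if in bounds else 0) == 1)
def fitsB (lock g : List (List Int)) (n m : Nat) (di dj : Int) : Bool :=
  (List.range n).all fun r => (List.range m).all fun c =>
    (gget lock r c +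
      (if 0 ≤ (r : Int) - di ∧ (r : Int) - di < (g.length : Int) ∧
          0 ≤ (c : Int) - dj ∧ (c : Int) - dj < (g.headI.length : Int)
       then gget g ((r : Int) - di).toNat ((c : Int) - dj).toNat else 0)) == 1

def solution_alt (key : List (List Int)) (lock : List (List Int)) : Bool :=
  let n := lock.length
  let m := lock.headI.length
  let g1 := rotB key
  let g2 := rotB g1
  let g3 := rotB g2
  let g4 := rotB g3
  let rots := [g1, g2, g3, g4]
  (PySem.List.pyRange (1 - (n : Int)) (n : Int) 1).any fun di =>
    (PySem.List.pyRange (1 - (m : Int)) (m : Int) 1).any fun dj =>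
      rots.any fun g => fitsB lock g n m di dj

-- ===== PRECONDITION & SPEC =====

-- Pre_ excludes only inputs on which a program raises IndexError: an empty lock or a lock row
-- shorter than its first row (A raises while copying the lock); an empty, zero-width or ragged
-- key (B's rotation raises there, and A raises too except the degenerate zero-width key over an
-- all-ones lock, cited in the claim); and, when the lock has positive width, keys with a side
-- exceeding min(n,m)+1: there A's stamping overruns the 3n×3m grid and raises IndexError unless
-- a fitting placement is found first, in which case both A and B return True (also cited) —
-- whether A returns on such a key is data-dependent, so it has no closed form.
def Pre_solution (key : List (List Int)) (lock : List (List Int)) : Prop :=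
  0 < lock.length ∧ (∀ row ∈ lock, lock.headI.length ≤ row.length) ∧
  0 < key.length ∧ 0 < key.headI.length ∧ (∀ row ∈ key, key.headI.length ≤ row.length) ∧
  (0 < lock.headI.length →
    key.length ≤ min lock.length lock.headI.length + 1 ∧
    key.headI.length ≤ min lock.length lock.headI.length + 1)

instance (key : List (List Int)) (lock : List (List Int)) : Decidable (Pre_solution key lock) := by
  unfold Pre_solution; infer_instance

def pvWitness_solution : List (List Int) × List (List Int) :=
  ([[0, 0], [1, 0]], [[1, 0], [0, 1]])

def Spec_solution (key : List (List Int)) (lock : List (List Int)) (out : Bool) : Prop := out = solution_alt key lock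
instance (key : List (List Int)) (lock : List (List Int)) (out : Bool) : Decidable (Spec_solution key lock out) := by unfold Spec_solution; infer_instance

-- ===== CLAIM (what is proved, stated in full; the proofs are below) =====
def Claim_equal_solution : Prop := ∀ (key : List (List Int)) (lock : List (List Int)), Dom_solution key lock → Pre_solution key lock → Spec_solution key lock (solution key lock)

-- ===== LEMMAS AND PROOFS =====

-- grid shape: R rows, each of length C
def Shape (g : List (List Int)) (R C : Nat) : Prop :=
  g.length = R ∧ ∀ (i : Nat), (h : i < g.length) → g[i].length = C

-- single-cell write/update primitives the ports' loop bodies are instances of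
def writeCell (g : List (List Int)) (p : Nat × Nat) (v : Int) : List (List Int) :=
  g.modify p.1 (fun row => row.set p.2 v)

def opCell (g : List (List Int)) (p : Nat × Nat) (f : Int → Int) : List (List Int) :=
  g.modify p.1 (fun row => row.modify p.2 f)

lemma gget_eq_getElem (g : List (List Int)) (i j : Nat) (h1 : i < g.length)
    (h2 : j < (g[i]'h1).length) : gget g i j = (g[i]'h1)[j]'h2 := by
  simp [gget, List.getD_eq_getElem?_getD, List.getElem?_eq_getElem h1, List.getElem?_eq_getElem h2]

lemma grid_eq_of_gget (g1 g2 : List (List Int)) (R C : Nat) (h1 : Shape g1 R C)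
    (h2 : Shape g2 R C) (h : ∀ a b, a < R → b < C → gget g1 a b = gget g2 a b) : g1 = g2 := by
  apply List.ext_getElem (by rw [h1.1, h2.1])
  intro i hi1 hi2
  apply List.ext_getElem (by rw [h1.2 i hi1, h2.2 i hi2])
  intro j hj1 hj2
  have ha : i < R := h1.1 ▸ hi1
  have hb : j < C := (h1.2 i hi1) ▸ hj1
  have := h i j ha hb
  rwa [gget_eq_getElem g1 i j hi1 hj1, gget_eq_getElem g2 i j hi2 hj2] at this

lemma getElem_modify_outer (l : List (List Int)) (k : Nat) (f : List Int → List Int)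
    (i : Nat) (hi : i < (l.modify k f).length) :
    (l.modify k f)[i] = if k = i then f (l[i]'(by simpa using hi)) else l[i]'(by simpa using hi) := by
  have hi' : i < l.length := by simpa using hi
  have h2 := List.getElem?_modify f k l i
  rw [List.getElem?_eq_getElem hi, List.getElem?_eq_getElem hi'] at h2
  simpa using h2

lemma shape_writeCell (g : List (List Int)) (p : Nat × Nat) (v : Int) (R C : Nat)
    (h : Shape g R C) : Shape (writeCell g p v) R C := by
  refine ⟨by simpa [writeCell] using h.1, ?_⟩
  intro i hi
  unfold writeCell
  rw [getElem_modify_outer]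
  split_ifs
  · simp [List.length_set, h.2 i (by simpa [writeCell] using hi)]
  · exact h.2 i (by simpa [writeCell] using hi)

lemma shape_opCell (g : List (List Int)) (p : Nat × Nat) (f : Int → Int) (R C : Nat)
    (h : Shape g R C) : Shape (opCell g p f) R C := by
  refine ⟨by simpa [opCell] using h.1, ?_⟩
  intro i hi
  unfold opCell
  rw [getElem_modify_outer]
  split_ifs
  · simp [List.length_modify, h.2 i (by simpa [opCell] using hi)]
  · exact h.2 i (by simpa [opCell] using hi)

lemma gget_writeCell (g : List (List Int)) (p : Nat × Nat) (v : Int) (R C : Nat)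
    (h : Shape g R C) (hp1 : p.1 < R) (hp2 : p.2 < C) (a b : Nat) :
    gget (writeCell g p v) a b = if p = (a, b) then v else gget g a b := by
  obtain ⟨x, y⟩ := p
  simp only [writeCell, gget, List.getD_eq_getElem?_getD, List.getElem?_modify]
  by_cases hx : x = a
  · subst hx
    have hlt : x < g.length := h.1 ▸ hp1
    have hrow : (g[x]'hlt).length = C := h.2 x hlt
    rw [List.getElem?_eq_getElem hlt]
    by_cases hy : y = b
    · subst hy
      simp [hrow, hp2]
    · simp [hy, Prod.ext_iff]
  · simp [hx, Prod.ext_iff]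

lemma gget_opCell (g : List (List Int)) (p : Nat × Nat) (f : Int → Int) (R C : Nat)
    (h : Shape g R C) (hp1 : p.1 < R) (hp2 : p.2 < C) (a b : Nat) :
    gget (opCell g p f) a b = if p = (a, b) then f (gget g a b) else gget g a b := by
  obtain ⟨x, y⟩ := p
  simp only [opCell, gget, List.getD_eq_getElem?_getD, List.getElem?_modify]
  by_cases hx : x = a
  · subst hx
    have hlt : x < g.length := h.1 ▸ hp1
    have hrow : (g[x]'hlt).length = C := h.2 x hlt
    rw [List.getElem?_eq_getElem hlt]
    by_cases hy : y = b
    · subst hy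
      have hylt : y < (g[x]'hlt).length := by rw [hrow]; exact hp2
      simp [List.getElem?_eq_getElem hylt]
    · simp [hy, Prod.ext_iff]
  · simp [hx, Prod.ext_iff]

lemma shape_foldl_write {A : Type} (addr : A → Nat × Nat) (val : A → Int) (R C : Nat) :
    ∀ (xs : List A) (g : List (List Int)), Shape g R C →
      Shape (xs.foldl (fun g x => writeCell g (addr x) (val x)) g) R C := by
  intro xs
  induction xs with
  | nil => intro g h; exact h
  | cons x xs ih => intro g h; exact ih _ (shape_writeCell _ _ _ _ _ h)

lemma shape_foldl_op {A : Type} (addr : A → Nat × Nat) (upd : A → Int → Int) (R C : Nat) :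
    ∀ (xs : List A) (g : List (List Int)), Shape g R C →
      Shape (xs.foldl (fun g x => opCell g (addr x) (upd x)) g) R C := by
  intro xs
  induction xs with
  | nil => intro g h; exact h
  | cons x xs ih => intro g h; exact ih _ (shape_opCell _ _ _ _ _ h)

lemma gget_foldl_write_miss {A : Type} (addr : A → Nat × Nat) (val : A → Int) (R C a b : Nat) :
    ∀ (xs : List A) (g : List (List Int)), Shape g R C →
      (∀ x ∈ xs, (addr x).1 < R ∧ (addr x).2 < C) →
      (∀ x ∈ xs, addr x ≠ (a, b)) →
      gget (xs.foldl (fun g x => writeCell g (addr x) (val x)) g) a b = gget g a b := by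
  intro xs
  induction xs with
  | nil => intro g _ _ _; rfl
  | cons x xs ih =>
    intro g h hb hne
    rw [List.foldl_cons, ih _ (shape_writeCell _ _ _ _ _ h)
        (fun y hy => hb y (List.mem_cons_of_mem _ hy)) (fun y hy => hne y (List.mem_cons_of_mem _ hy)),
      gget_writeCell _ _ _ _ _ h (hb x (List.mem_cons_self)).1 (hb x (List.mem_cons_self)).2,
      if_neg (hne x (List.mem_cons_self))]

lemma gget_foldl_op_miss {A : Type} (addr : A → Nat × Nat) (upd : A → Int → Int) (R C a b : Nat) :
    ∀ (xs : List A) (g : List (List Int)), Shape g R C →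
      (∀ x ∈ xs, (addr x).1 < R ∧ (addr x).2 < C) →
      (∀ x ∈ xs, addr x ≠ (a, b)) →
      gget (xs.foldl (fun g x => opCell g (addr x) (upd x)) g) a b = gget g a b := by
  intro xs
  induction xs with
  | nil => intro g _ _ _; rfl
  | cons x xs ih =>
    intro g h hb hne
    rw [List.foldl_cons, ih _ (shape_opCell _ _ _ _ _ h)
        (fun y hy => hb y (List.mem_cons_of_mem _ hy)) (fun y hy => hne y (List.mem_cons_of_mem _ hy)),
      gget_opCell _ _ _ _ _ h (hb x (List.mem_cons_self)).1 (hb x (List.mem_cons_self)).2,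
      if_neg (hne x (List.mem_cons_self))]

lemma gget_foldl_write_hit {A : Type} (addr : A → Nat × Nat) (val : A → Int) (R C a b : Nat) :
    ∀ (xs : List A) (g : List (List Int)) (x : A), Shape g R C →
      (∀ y ∈ xs, (addr y).1 < R ∧ (addr y).2 < C) →
      (xs.map addr).Nodup → x ∈ xs → addr x = (a, b) →
      gget (xs.foldl (fun g x => writeCell g (addr x) (val x)) g) a b = val x := by
  intro xs
  induction xs with
  | nil => intro g x _ _ _ hx; exact absurd hx (List.not_mem_nil)
  | cons z xs ih =>
    intro g x h hb hnd hx haddr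
    rw [List.map_cons, List.nodup_cons] at hnd
    rcases List.mem_cons.mp hx with hxz | hxs
    · subst hxz
      rw [List.foldl_cons,
        gget_foldl_write_miss addr val R C a b xs _ (shape_writeCell _ _ _ _ _ h)
          (fun y hy => hb y (List.mem_cons_of_mem _ hy))
          (fun y hy hcon => hnd.1 (haddr ▸ hcon ▸ List.mem_map_of_mem hy)),
        gget_writeCell _ _ _ _ _ h (hb x (List.mem_cons_self)).1 (hb x (List.mem_cons_self)).2,
        if_pos haddr]
    · have hzne : addr z ≠ (a, b) := by
        intro hcon
        exact hnd.1 (by rw [hcon, ← haddr]; exact List.mem_map_of_mem hxs)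
      rw [List.foldl_cons]
      exact ih _ x (shape_writeCell _ _ _ _ _ h)
        (fun y hy => hb y (List.mem_cons_of_mem _ hy)) hnd.2 hxs haddr

lemma gget_foldl_op_hit {A : Type} (addr : A → Nat × Nat) (upd : A → Int → Int) (R C a b : Nat) :
    ∀ (xs : List A) (g : List (List Int)) (x : A), Shape g R C →
      (∀ y ∈ xs, (addr y).1 < R ∧ (addr y).2 < C) →
      (xs.map addr).Nodup → x ∈ xs → addr x = (a, b) →
      gget (xs.foldl (fun g x => opCell g (addr x) (upd x)) g) a b = upd x (gget g a b) := by
  intro xs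
  induction xs with
  | nil => intro g x _ _ _ hx; exact absurd hx (List.not_mem_nil)
  | cons z xs ih =>
    intro g x h hb hnd hx haddr
    rw [List.map_cons, List.nodup_cons] at hnd
    rcases List.mem_cons.mp hx with hxz | hxs
    · subst hxz
      rw [List.foldl_cons,
        gget_foldl_op_miss addr upd R C a b xs _ (shape_opCell _ _ _ _ _ h)
          (fun y hy => hb y (List.mem_cons_of_mem _ hy))
          (fun y hy hcon => hnd.1 (haddr ▸ hcon ▸ List.mem_map_of_mem hy)),
        gget_opCell _ _ _ _ _ h (hb x (List.mem_cons_self)).1 (hb x (List.mem_cons_self)).2,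
        if_pos haddr]
    · have hzne : addr z ≠ (a, b) := by
        intro hcon
        exact hnd.1 (by rw [hcon, ← haddr]; exact List.mem_map_of_mem hxs)
      rw [List.foldl_cons,
        ih _ x (shape_opCell _ _ _ _ _ h) (fun y hy => hb y (List.mem_cons_of_mem _ hy)) hnd.2 hxs haddr,
        gget_opCell _ _ _ _ _ h (hb z (List.mem_cons_self)).1 (hb z (List.mem_cons_self)).2,
        if_neg hzne]

lemma foldl_foldl_product {A B : Type} (F : List (List Int) → A × B → List (List Int))
    (xs : List A) (ys : List B) :
    ∀ init, xs.foldl (fun g x => ys.foldl (fun g y => F g (x, y)) g) init =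
      (xs ×ˢ ys).foldl F init := by
  induction xs with
  | nil => intro init; simp
  | cons x xs ih =>
    intro init
    rw [List.foldl_cons, List.product_cons, List.foldl_append, List.foldl_map, ih]

lemma shape_replicate (R C : Nat) (x : Int) :
    Shape (List.replicate R (List.replicate C x)) R C := by
  refine ⟨List.length_replicate, ?_⟩
  intro i hi
  simp

lemma gget_replicate (R C : Nat) (x : Int) (a b : Nat) (ha : a < R) (hb : b < C) :
    gget (List.replicate R (List.replicate C x)) a b = x := by
  simp [gget, List.getD_eq_getElem?_getD, ha, hb]

-- ===== rotation characterisation =====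

lemma rotateA_eq_fold (g : List (List Int)) :
    rotateA g = ((List.range g.length) ×ˢ (List.range g.headI.length)).foldl
      (fun e x => writeCell e (x.2, g.length - x.1 - 1) (gget g x.1 x.2))
      (List.replicate g.headI.length (List.replicate g.length 0)) := by
  unfold rotateA
  exact foldl_foldl_product
    (fun e x => writeCell e (x.2, g.length - x.1 - 1) (gget g x.1 x.2)) _ _ _

lemma shape_rotateA (g : List (List Int)) : Shape (rotateA g) g.headI.length g.length := by
  rw [rotateA_eq_fold]
  exact shape_foldl_write _ _ _ _ _ _ (shape_replicate _ _ _)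

lemma gget_rotateA (g : List (List Int)) (a b : Nat) (ha : a < g.headI.length)
    (hb : b < g.length) : gget (rotateA g) a b = gget g (g.length - 1 - b) a := by
  rw [rotateA_eq_fold]
  rw [gget_foldl_write_hit _ _ g.headI.length g.length a b _ _ (g.length - 1 - b, a)
    (shape_replicate _ _ _) ?_ ?_ ?_ ?_]
  · intro y hy
    obtain ⟨y1, y2⟩ := y
    rw [List.mem_product, List.mem_range, List.mem_range] at hy
    exact ⟨hy.2, by omega⟩
  · apply List.Nodup.map_on
    · intro p hp q hq hpq
      obtain ⟨p1, p2⟩ := p; obtain ⟨q1, q2⟩ := q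
      rw [List.mem_product, List.mem_range, List.mem_range] at hp hq
      have hpq' : (p2, g.length - p1 - 1) = (q2, g.length - q1 - 1) := hpq
      rw [Prod.mk.injEq] at hpq' ⊢
      omega
    · exact List.Nodup.product List.nodup_range List.nodup_range
  · rw [List.mem_product, List.mem_range, List.mem_range]
    exact ⟨by omega, ha⟩
  · show (a, g.length - (g.length - 1 - b) - 1) = (a, b)
    rw [Prod.mk.injEq]
    exact ⟨rfl, by omega⟩

lemma shape_rotB (g : List (List Int)) : Shape (rotB g) g.headI.length g.length := by
  refine ⟨by simp [rotB], ?_⟩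
  intro i hi
  simp [rotB]

lemma gget_rotB (g : List (List Int)) (a b : Nat) (ha : a < g.headI.length)
    (hb : b < g.length) : gget (rotB g) a b = gget g (g.length - 1 - b) a := by
  have h1 : a < (List.range g.headI.length).length := by simpa using ha
  have hb' : b < ((List.range g.length).reverse).length := by simpa using hb
  simp only [rotB, gget, List.getD_eq_getElem?_getD, List.getElem?_map,
    List.getElem?_range ha, Option.map_some, Option.getD_some,
    List.getElem?_eq_getElem hb']
  rw [List.getElem_reverse]
  simp [List.getElem_range]

lemma rotA_eq_rotB (g : List (List Int)) : rotateA g = rotB g := by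
  refine grid_eq_of_gget _ _ g.headI.length g.length (shape_rotateA g) (shape_rotB g) ?_
  intro a b ha hb
  rw [gget_rotateA g a b ha hb, gget_rotB g a b ha hb]

lemma headI_len (g : List (List Int)) (R C : Nat) (h : Shape g R C) (hR : 0 < R) :
    g.headI.length = C := by
  cases g with
  | nil => simp [Shape] at h; omega
  | cons row t => exact h.2 0 (by simp)

lemma rotB_four (h : List (List Int)) (R C : Nat) (hsh : Shape h R C) (hR : 0 < R)
    (hC : 0 < C) : rotB (rotB (rotB (rotB h))) = h := by
  have e0h : h.headI.length = C := headI_len h R C hsh hR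
  have s1 : Shape (rotB h) C R := by have := shape_rotB h; rwa [e0h, hsh.1] at this
  have e1h : (rotB h).headI.length = R := headI_len _ C R s1 hC
  have s2 : Shape (rotB (rotB h)) R C := by have := shape_rotB (rotB h); rwa [e1h, s1.1] at this
  have e2h : (rotB (rotB h)).headI.length = C := headI_len _ R C s2 hR
  have s3 : Shape (rotB (rotB (rotB h))) C R := by
    have := shape_rotB (rotB (rotB h)); rwa [e2h, s2.1] at this
  have e3h : (rotB (rotB (rotB h))).headI.length = R := headI_len _ C R s3 hC
  have s4 : Shape (rotB (rotB (rotB (rotB h)))) R C := by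
    have := shape_rotB (rotB (rotB (rotB h))); rwa [e3h, s3.1] at this
  refine grid_eq_of_gget _ _ R C s4 hsh ?_
  intro a b ha hb
  rw [gget_rotB _ a b (by rw [e3h]; exact ha) (by rw [s3.1]; exact hb), s3.1]
  rw [gget_rotB _ (C - 1 - b) a (by rw [e2h]; omega) (by rw [s2.1]; exact ha), s2.1]
  rw [gget_rotB _ (R - 1 - a) (C - 1 - b) (by rw [e1h]; omega) (by rw [s1.1]; omega), s1.1]
  rw [gget_rotB _ (C - 1 - (C - 1 - b)) (R - 1 - a) (by rw [e0h]; omega)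
    (by rw [hsh.1]; omega), hsh.1]
  congr 1 <;> omega

-- ===== extended-grid characterisation =====

lemma extBase_eq_fold (lock : List (List Int)) (n m : Nat) :
    extBase lock n m = ((List.range n) ×ˢ (List.range m)).foldl
      (fun e x => writeCell e (n + x.1, m + x.2) (gget lock x.1 x.2))
      (List.replicate (3 * n) (List.replicate (3 * m) 1)) := by
  unfold extBase
  exact foldl_foldl_product (fun e x => writeCell e (n + x.1, m + x.2) (gget lock x.1 x.2)) _ _ _

lemma extBase_bounds (n m : Nat) :
    ∀ y ∈ (List.range n) ×ˢ (List.range m), (n + y.1, m + y.2).1 < 3 * n ∧ (n + y.1, m + y.2).2 < 3 * m := by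
  intro y hy
  obtain ⟨y1, y2⟩ := y
  rw [List.mem_product, List.mem_range, List.mem_range] at hy
  exact ⟨by omega, by omega⟩

lemma shape_extBase (lock : List (List Int)) (n m : Nat) :
    Shape (extBase lock n m) (3 * n) (3 * m) := by
  rw [extBase_eq_fold]
  exact shape_foldl_write _ _ _ _ _ _ (shape_replicate _ _ _)

lemma gget_extBase (lock : List (List Int)) (n m a b : Nat) (ha : a < 3 * n) (hb : b < 3 * m) :
    gget (extBase lock n m) a b =
      if n ≤ a ∧ a < n + n ∧ m ≤ b ∧ b < m + m then gget lock (a - n) (b - m) else 1 := by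
  rw [extBase_eq_fold]
  split_ifs with hc
  · rw [gget_foldl_write_hit _ _ (3 * n) (3 * m) a b _ _ (a - n, b - m)
      (shape_replicate _ _ _) (extBase_bounds n m) ?_ ?_ ?_]
    · apply List.Nodup.map_on
      · intro p hp q hq hpq
        obtain ⟨p1, p2⟩ := p; obtain ⟨q1, q2⟩ := q
        have hpq' : (n + p1, m + p2) = (n + q1, m + q2) := hpq
        rw [Prod.mk.injEq] at hpq' ⊢
        omega
      · exact List.Nodup.product List.nodup_range List.nodup_range
    · rw [List.mem_product, List.mem_range, List.mem_range]
      exact ⟨by omega, by omega⟩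
    · show (n + (a - n), m + (b - m)) = (a, b)
      rw [Prod.mk.injEq]
      exact ⟨by omega, by omega⟩
  · rw [gget_foldl_write_miss _ _ (3 * n) (3 * m) a b _ _
      (shape_replicate _ _ _) (extBase_bounds n m) ?_]
    · exact gget_replicate _ _ _ _ _ ha hb
    · intro y hy
      obtain ⟨y1, y2⟩ := y
      rw [List.mem_product, List.mem_range, List.mem_range] at hy
      show ¬((n + y1, m + y2) = (a, b))
      rw [Prod.mk.injEq]
      omega

-- ===== stamping characterisation =====

lemma addA_eq_fold (ext : List (List Int)) (i j : Nat) (g : List (List Int)) :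
    addA ext i j g = ((List.range g.length) ×ˢ (List.range g.headI.length)).foldl
      (fun e x => opCell e (i + x.1, j + x.2) (fun v => v + gget g x.1 x.2)) ext := by
  unfold addA
  exact foldl_foldl_product
    (fun e x => opCell e (i + x.1, j + x.2) (fun v => v + gget g x.1 x.2)) _ _ _

lemma subA_eq_fold (ext : List (List Int)) (i j : Nat) (g : List (List Int)) :
    subA ext i j g = ((List.range g.length) ×ˢ (List.range g.headI.length)).foldl
      (fun e x => opCell e (i + x.1, j + x.2) (fun v => v - gget g x.1 x.2)) ext := by
  unfold subA
  exact foldl_foldl_product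
    (fun e x => opCell e (i + x.1, j + x.2) (fun v => v - gget g x.1 x.2)) _ _ _

lemma stamp_bounds (i j : Nat) (g : List (List Int)) (R C : Nat)
    (h1 : i + g.length ≤ R) (h2 : j + g.headI.length ≤ C) :
    ∀ y ∈ (List.range g.length) ×ˢ (List.range g.headI.length),
      (i + y.1, j + y.2).1 < R ∧ (i + y.1, j + y.2).2 < C := by
  intro y hy
  obtain ⟨y1, y2⟩ := y
  rw [List.mem_product, List.mem_range, List.mem_range] at hy
  exact ⟨by omega, by omega⟩

lemma stamp_nodup (i j : Nat) (g : List (List Int)) :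
    (((List.range g.length) ×ˢ (List.range g.headI.length)).map
      (fun x : Nat × Nat => (i + x.1, j + x.2))).Nodup := by
  apply List.Nodup.map_on
  · intro p hp q hq hpq
    obtain ⟨p1, p2⟩ := p; obtain ⟨q1, q2⟩ := q
    have hpq' : (i + p1, j + p2) = (i + q1, j + q2) := hpq
    rw [Prod.mk.injEq] at hpq' ⊢
    omega
  · exact List.Nodup.product List.nodup_range List.nodup_range

lemma gget_addA (ext : List (List Int)) (i j : Nat) (g : List (List Int)) (R C : Nat)
    (h : Shape ext R C) (h1 : i + g.length ≤ R) (h2 : j + g.headI.length ≤ C) (a b : Nat) :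
    gget (addA ext i j g) a b = gget ext a b +
      (if i ≤ a ∧ a < i + g.length ∧ j ≤ b ∧ b < j + g.headI.length
       then gget g (a - i) (b - j) else 0) := by
  rw [addA_eq_fold]
  split_ifs with hc
  · rw [gget_foldl_op_hit _ _ R C a b _ _ (a - i, b - j) h (stamp_bounds i j g R C h1 h2)
      (stamp_nodup i j g) ?_ ?_]
    · rw [List.mem_product, List.mem_range, List.mem_range]
      exact ⟨by omega, by omega⟩
    · show (i + (a - i), j + (b - j)) = (a, b)
      rw [Prod.mk.injEq]
      exact ⟨by omega, by omega⟩
  · rw [gget_foldl_op_miss _ _ R C a b _ _ h (stamp_bounds i j g R C h1 h2) ?_, add_zero]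
    intro y hy
    obtain ⟨y1, y2⟩ := y
    rw [List.mem_product, List.mem_range, List.mem_range] at hy
    show ¬((i + y1, j + y2) = (a, b))
    rw [Prod.mk.injEq]
    omega

lemma gget_subA (ext : List (List Int)) (i j : Nat) (g : List (List Int)) (R C : Nat)
    (h : Shape ext R C) (h1 : i + g.length ≤ R) (h2 : j + g.headI.length ≤ C) (a b : Nat) :
    gget (subA ext i j g) a b = gget ext a b -
      (if i ≤ a ∧ a < i + g.length ∧ j ≤ b ∧ b < j + g.headI.length
       then gget g (a - i) (b - j) else 0) := by
  rw [subA_eq_fold]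
  split_ifs with hc
  · rw [gget_foldl_op_hit _ _ R C a b _ _ (a - i, b - j) h (stamp_bounds i j g R C h1 h2)
      (stamp_nodup i j g) ?_ ?_]
    · rw [List.mem_product, List.mem_range, List.mem_range]
      exact ⟨by omega, by omega⟩
    · show (i + (a - i), j + (b - j)) = (a, b)
      rw [Prod.mk.injEq]
      exact ⟨by omega, by omega⟩
  · rw [gget_foldl_op_miss _ _ R C a b _ _ h (stamp_bounds i j g R C h1 h2) ?_, sub_zero]
    intro y hy
    obtain ⟨y1, y2⟩ := y
    rw [List.mem_product, List.mem_range, List.mem_range] at hy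
    show ¬((i + y1, j + y2) = (a, b))
    rw [Prod.mk.injEq]
    omega

lemma shape_addA (ext : List (List Int)) (i j : Nat) (g : List (List Int)) (R C : Nat)
    (h : Shape ext R C) : Shape (addA ext i j g) R C := by
  rw [addA_eq_fold]; exact shape_foldl_op _ _ _ _ _ _ h

lemma shape_subA (ext : List (List Int)) (i j : Nat) (g : List (List Int)) (R C : Nat)
    (h : Shape ext R C) : Shape (subA ext i j g) R C := by
  rw [subA_eq_fold]; exact shape_foldl_op _ _ _ _ _ _ h

lemma subA_addA (ext : List (List Int)) (i j : Nat) (g : List (List Int)) (R C : Nat)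
    (h : Shape ext R C) (h1 : i + g.length ≤ R) (h2 : j + g.headI.length ≤ C) :
    subA (addA ext i j g) i j g = ext := by
  refine grid_eq_of_gget _ _ R C (shape_subA _ _ _ _ _ _ (shape_addA _ _ _ _ _ _ h)) h ?_
  intro a b _ _
  rw [gget_subA _ _ _ _ R C (shape_addA _ _ _ _ _ _ h) h1 h2,
    gget_addA _ _ _ _ R C h h1 h2]
  split_ifs <;> ring

-- ===== check ↔ fits =====

lemma all_congr_mem {A : Type} (l : List A) (p q : A → Bool) (h : ∀ x ∈ l, p x = q x) :
    l.all p = l.all q := by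
  induction l with
  | nil => rfl
  | cons x xs ih => simp_all

lemma check_eq_fits (lock g : List (List Int)) (n m i j : Nat)
    (h1 : i + g.length ≤ 3 * n) (h2 : j + g.headI.length ≤ 3 * m) :
    checkA (addA (extBase lock n m) i j g) n m =
      fitsB lock g n m ((i : Int) - (n : Int)) ((j : Int) - (m : Int)) := by
  unfold checkA fitsB
  apply all_congr_mem
  intro r hr
  rw [List.mem_range] at hr
  apply all_congr_mem
  intro c hc
  rw [List.mem_range] at hc
  have := gget_addA (extBase lock n m) i j g (3 * n) (3 * m)
    (shape_extBase lock n m) h1 h2 (n + r) (m + c)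
  rw [gget_extBase lock n m (n + r) (m + c) (by omega) (by omega),
    if_pos (by omega : n ≤ n + r ∧ n + r < n + n ∧ m ≤ m + c ∧ m + c < m + m)] at this
  rw [this]
  have er : n + r - n = r := by omega
  have ec : m + c - m = c := by omega
  rw [er, ec]
  congr 1
  congr 1
  split_ifs with hA hB hB
  · congr 1 <;> omega
  · exfalso; omega
  · exfalso; omega
  · rfl

-- ===== the loop structure =====

def rots4 (key : List (List Int)) : List (List (List Int)) :=
  [rotB key, rotB (rotB key), rotB (rotB (rotB key)), rotB (rotB (rotB (rotB key)))]

def hitIJ (lock key : List (List Int)) (n m i j : Nat) : Bool :=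
  (rots4 key).any fun g => fitsB lock g n m ((i : Int) - (n : Int)) ((j : Int) - (m : Int))

lemma loopKA_step (n m i j k : Nat) (ext key : List (List Int)) :
    loopKA n m i j (k + 1) ext key =
      (if checkA (addA ext i j (rotateA key)) n m
       then (true, addA ext i j (rotateA key), rotateA key)
       else loopKA n m i j k (subA (addA ext i j (rotateA key)) i j (rotateA key)) (rotateA key)) := by
  rfl

lemma loopKA_spec (lock key0 : List (List Int)) (n m i j : Nat)
    (hkn : 0 < key0.length) (hkm : 0 < key0.headI.length)
    (hdn : key0.length ≤ min n m + 1) (hdm : key0.headI.length ≤ min n m + 1)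
    (_hi1 : 1 ≤ i) (hi2 : i ≤ 2 * n - 1) (_hj1 : 1 ≤ j) (hj2 : j ≤ 2 * m - 1)
    (hn : 0 < n) (hm : 0 < m)
    (key' : List (List Int)) (hk' : rotB key' = rotB key0) :
    ((loopKA n m i j 4 (extBase lock n m) key').1 = hitIJ lock key0 n m i j) ∧
    (hitIJ lock key0 n m i j = false →
      loopKA n m i j 4 (extBase lock n m) key' =
        (false, extBase lock n m, rotB (rotB (rotB (rotB key0))))) := by
  have s1 : Shape (rotB key0) key0.headI.length key0.length := shape_rotB key0
  have e1 : (rotB key0).headI.length = key0.length := headI_len _ _ _ s1 hkm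
  have s2 : Shape (rotB (rotB key0)) key0.length key0.headI.length := by
    have := shape_rotB (rotB key0); rwa [e1, s1.1] at this
  have e2 : (rotB (rotB key0)).headI.length = key0.headI.length := headI_len _ _ _ s2 hkn
  have s3 : Shape (rotB (rotB (rotB key0))) key0.headI.length key0.length := by
    have := shape_rotB (rotB (rotB key0)); rwa [e2, s2.1] at this
  have e3 : (rotB (rotB (rotB key0))).headI.length = key0.length := headI_len _ _ _ s3 hkm
  have s4 : Shape (rotB (rotB (rotB (rotB key0)))) key0.length key0.headI.length := by
    have := shape_rotB (rotB (rotB (rotB key0))); rwa [e3, s3.1] at this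
  -- fit bounds for the four rotations
  have f1a : i + (rotB key0).length ≤ 3 * n := by rw [s1.1]; omega
  have f1b : j + (rotB key0).headI.length ≤ 3 * m := by rw [e1]; omega
  have f2a : i + (rotB (rotB key0)).length ≤ 3 * n := by rw [s2.1]; omega
  have f2b : j + (rotB (rotB key0)).headI.length ≤ 3 * m := by rw [e2]; omega
  have f3a : i + (rotB (rotB (rotB key0))).length ≤ 3 * n := by rw [s3.1]; omega
  have f3b : j + (rotB (rotB (rotB key0))).headI.length ≤ 3 * m := by rw [e3]; omega
  have f4a : i + (rotB (rotB (rotB (rotB key0)))).length ≤ 3 * n := by rw [s4.1]; omega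
  have f4b : j + (rotB (rotB (rotB (rotB key0)))).headI.length ≤ 3 * m := by
    rw [headI_len _ _ _ s4 hkn]; omega
  have hE := shape_extBase lock n m
  have hrw1 : rotateA key' = rotB key0 := by rw [rotA_eq_rotB, hk']
  rw [loopKA_step, hrw1, check_eq_fits lock _ n m i j f1a f1b]
  rw [subA_addA _ i j _ (3 * n) (3 * m) hE f1a f1b]
  rw [loopKA_step, rotA_eq_rotB, check_eq_fits lock _ n m i j f2a f2b]
  rw [subA_addA _ i j _ (3 * n) (3 * m) hE f2a f2b]
  rw [loopKA_step, rotA_eq_rotB, check_eq_fits lock _ n m i j f3a f3b]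
  rw [subA_addA _ i j _ (3 * n) (3 * m) hE f3a f3b]
  rw [loopKA_step, rotA_eq_rotB, check_eq_fits lock _ n m i j f4a f4b]
  rw [subA_addA _ i j _ (3 * n) (3 * m) hE f4a f4b]
  unfold hitIJ rots4
  simp only [List.any_cons, List.any_nil, Bool.or_false]
  split_ifs with c1 c2 c3 c4 <;>
    simp_all [loopKA]

lemma loopJA_cons (n m i j : Nat) (js : List Nat) (ext key : List (List Int)) :
    loopJA n m i (j :: js) ext key =
      (if (loopKA n m i j 4 ext key).1
       then loopKA n m i j 4 ext key
       else loopJA n m i js (loopKA n m i j 4 ext key).2.1 (loopKA n m i j 4 ext key).2.2) := by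
  rfl

lemma loopIA_cons (n m i : Nat) (js is : List Nat) (ext key : List (List Int)) :
    loopIA n m js (i :: is) ext key =
      (if (loopJA n m i js ext key).1
       then loopJA n m i js ext key
       else loopIA n m js is (loopJA n m i js ext key).2.1 (loopJA n m i js ext key).2.2) := by
  rfl

lemma loopJA_spec (lock key0 : List (List Int)) (n m i : Nat)
    (hkn : 0 < key0.length) (hkm : 0 < key0.headI.length)
    (hdn : key0.length ≤ min n m + 1) (hdm : key0.headI.length ≤ min n m + 1)
    (hi1 : 1 ≤ i) (hi2 : i ≤ 2 * n - 1) (hn : 0 < n) (hm : 0 < m) :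
    ∀ (js : List Nat) (key' : List (List Int)), rotB key' = rotB key0 →
      (∀ j ∈ js, 1 ≤ j ∧ j ≤ 2 * m - 1) →
      ((loopJA n m i js (extBase lock n m) key').1 =
        js.any (fun j => hitIJ lock key0 n m i j)) ∧
      (js.any (fun j => hitIJ lock key0 n m i j) = false →
        ∃ key'', loopJA n m i js (extBase lock n m) key' = (false, extBase lock n m, key'') ∧
          rotB key'' = rotB key0) := by
  intro js
  induction js with
  | nil =>
    intro key' hk' _
    exact ⟨rfl, fun _ => ⟨key', rfl, hk'⟩⟩
  | cons j js ih =>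
    intro key' hk' hjs
    have hj := hjs j (List.mem_cons_self)
    have hK := loopKA_spec lock key0 n m i j hkn hkm hdn hdm hi1 hi2 hj.1 hj.2 hn hm key' hk'
    by_cases hhit : hitIJ lock key0 n m i j
    · constructor
      · rw [loopJA_cons]
        simp [hK.1, hhit]
      · intro hall
        simp [hhit] at hall
    · have hk4 : rotB (rotB (rotB (rotB (rotB key0)))) = rotB key0 := by
        have : rotB (rotB (rotB (rotB (rotB key0)))) = rotB key0 :=
          rotB_four (rotB key0) key0.headI.length key0.length (shape_rotB key0) hkm hkn
        exact this
      have hrec := ih (rotB (rotB (rotB (rotB key0)))) hk4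
        (fun y hy => hjs y (List.mem_cons_of_mem _ hy))
      have heq : loopJA n m i (j :: js) (extBase lock n m) key' =
          loopJA n m i js (extBase lock n m) (rotB (rotB (rotB (rotB key0)))) := by
        rw [loopJA_cons, hK.2 (by simpa using hhit)]
        simp
      rw [heq]
      constructor
      · rw [hrec.1]
        simp [hhit]
      · intro hall
        simp only [List.any_cons, Bool.or_eq_false_iff] at hall
        exact hrec.2 hall.2

lemma loopIA_spec (lock key0 : List (List Int)) (n m : Nat)
    (hkn : 0 < key0.length) (hkm : 0 < key0.headI.length)
    (hdn : key0.length ≤ min n m + 1) (hdm : key0.headI.length ≤ min n m + 1)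
    (hn : 0 < n) (hm : 0 < m) (js : List Nat) (hjs : ∀ j ∈ js, 1 ≤ j ∧ j ≤ 2 * m - 1) :
    ∀ (is : List Nat) (key' : List (List Int)), rotB key' = rotB key0 →
      (∀ i ∈ is, 1 ≤ i ∧ i ≤ 2 * n - 1) →
      (loopIA n m js is (extBase lock n m) key').1 =
        is.any (fun i => js.any (fun j => hitIJ lock key0 n m i j)) := by
  intro is
  induction is with
  | nil => intro key' _ _; rfl
  | cons i is ih =>
    intro key' hk' his
    have hi := his i (List.mem_cons_self)
    have hJ := loopJA_spec lock key0 n m i hkn hkm hdn hdm hi.1 hi.2 hn hm js key' hk' hjs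
    by_cases hhit : js.any (fun j => hitIJ lock key0 n m i j)
    · rw [loopIA_cons]
      simp [hJ.1, hhit]
    · obtain ⟨key'', hkey'', hrot''⟩ := hJ.2 (by simpa using hhit)
      have heq : loopIA n m js (i :: is) (extBase lock n m) key' =
          loopIA n m js is (extBase lock n m) key'' := by
        rw [loopIA_cons, hkey'']
        simp
      rw [heq, ih key'' hrot'' (fun y hy => his y (List.mem_cons_of_mem _ hy))]
      simp [hhit]

-- ===== the zero-width-lock case: both searches iterate over an empty column range =====

lemma loopIA_nil_js (n m : Nat) :
    ∀ (is : List Nat) (ext key : List (List Int)), (loopIA n m [] is ext key).1 = false := by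
  intro is
  induction is with
  | nil => intro ext key; rfl
  | cons i is ih =>
    intro ext key
    rw [loopIA_cons]
    simp only [loopJA]
    exact ih ext key

lemma solution_zero_width (key lock : List (List Int)) (hm0 : lock.headI.length = 0) :
    solution key lock = false ∧ solution_alt key lock = false := by
  constructor
  · show (loopIA lock.length lock.headI.length
        ((List.range (2 * lock.headI.length - 1)).map (· + 1)) _ _ _).1 = false
    rw [hm0]
    exact loopIA_nil_js _ _ _ _ _
  · show (PySem.List.pyRange (1 - (lock.length : Int)) (lock.length : Int) 1).any _ = false
    rw [List.any_eq_false]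
    intro di _
    rw [hm0]
    rw [show PySem.List.pyRange (1 - ((0 : Nat) : Int)) ((0 : Nat) : Int) 1 = [] from by decide]
    simp

-- ===== assembling both sides =====

lemma range_succ_bounds (t : Nat) : ∀ x ∈ (List.range t).map (· + 1), 1 ≤ x ∧ x ≤ t := by
  intro x hx
  rw [List.mem_map] at hx
  obtain ⟨y, hy, rfl⟩ := hx
  rw [List.mem_range] at hy
  omega

lemma pyRange_any_eq (n : Nat) (hn : 0 < n) (p : Int → Bool) (q : Nat → Bool)
    (hq : ∀ k, q (k + 1) = p ((1 - (n : Int)) + k)) :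
    (PySem.List.pyRange (1 - (n : Int)) (n : Int) 1).any p =
      ((List.range (2 * n - 1)).map (· + 1)).any q := by
  rw [PySem.List.pyRange_one, List.any_map, List.any_map]
  apply List.any_congr
  · congr 1
    omega
  · intro k
    simpa using (hq k).symm

theorem solution_eq (key lock : List (List Int)) (hpre : Pre_solution key lock) :
    solution key lock = solution_alt key lock := by
  obtain ⟨hn, _, hkn, hkm, _, hcap⟩ := hpre
  by_cases hm : 0 < lock.headI.length
  case neg =>
    have h := solution_zero_width key lock (by omega)
    rw [h.1, h.2]
  case pos =>
  obtain ⟨hdn, hdm⟩ := hcap hm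
  show (loopIA lock.length lock.headI.length
      ((List.range (2 * lock.headI.length - 1)).map (· + 1))
      ((List.range (2 * lock.length - 1)).map (· + 1))
      (extBase lock lock.length lock.headI.length) key).1 = _
  rw [loopIA_spec lock key lock.length lock.headI.length hkn hkm hdn hdm hn hm
    _ (range_succ_bounds _) _ key rfl (range_succ_bounds _)]
  have hinner : ∀ (i : Nat),
      ((List.range (2 * lock.headI.length - 1)).map (· + 1)).any
        (fun j => hitIJ lock key lock.length lock.headI.length i j) =
      (PySem.List.pyRange (1 - (lock.headI.length : Int)) (lock.headI.length : Int) 1).any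
        (fun dj => (rots4 key).any fun g =>
          fitsB lock g lock.length lock.headI.length ((i : Int) - (lock.length : Int)) dj) := by
    intro i
    symm
    apply pyRange_any_eq lock.headI.length hm
    intro l
    unfold hitIJ
    rw [show (((l + 1 : Nat) : Int) - (lock.headI.length : Int)) =
      1 - (lock.headI.length : Int) + (l : Int) by push_cast; ring]
  show _ = (PySem.List.pyRange (1 - (lock.length : Int)) (lock.length : Int) 1).any
      (fun di => (PySem.List.pyRange (1 - (lock.headI.length : Int)) (lock.headI.length : Int) 1).any
        (fun dj => (rots4 key).any fun g =>
          fitsB lock g lock.length lock.headI.length di dj))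
  symm
  apply pyRange_any_eq lock.length hn
  intro k
  rw [hinner (k + 1)]
  rw [show (((k + 1 : Nat) : Int) - (lock.length : Int)) =
    1 - (lock.length : Int) + (k : Int) by push_cast; ring]

-- ===== VERDICT (by name: the statements are the Claim_ definitions above) =====
theorem solution_spec : Claim_equal_solution := by
  intro key lock _ hpre
  unfold Spec_solution
  exact solution_eq key lock hpre
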